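-- pv_equiv track=rewrite | github.com/wyh196646/PathMem | pathagent.py | resolve_long_id
-- ===== SOURCE A (Python) =====
-- def resolve_long_id(target_long_id, all_descriptions):
--     keys = list(all_descriptions.keys())
--
--     if target_long_id in all_descriptions:
--         return target_long_id, "exact"
--
--     start_matches = [k for k in keys if k.startswith(target_long_id)]
--     if start_matches:
--         return start_matches[0], "key_startswith_target"
--
--     reverse_start_matches = [k for k in keys if target_long_id.startswith(k)]
--     if reverse_start_matches:
--         return reverse_start_matches[0], "target_startswith_key"
--
--     target_core = target_long_id.split(".")[0]
--     core_matches = [k for k in keys if k.split(".")[0] == target_core]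
--     if core_matches:
--         return core_matches[0], "core_id_match"
--
--     return target_long_id, None
-- ===== SOURCE B (Python) =====
-- def resolve_long_id(target_long_id, all_descriptions):
--     if target_long_id in all_descriptions:
--         return target_long_id, "exact"
--     target_core = target_long_id.split(".")[0]
--     fwd = rev = core = None
--     for k in all_descriptions:
--         if fwd is None and k.startswith(target_long_id):
--             fwd = k
--         if rev is None and target_long_id.startswith(k):
--             rev = k
--         if core is None and k.split(".")[0] == target_core:
--             core = k
--     if fwd is not None:
--         return fwd, "key_startswith_target"
--     if rev is not None:
--         return rev, "target_startswith_key"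
--     if core is not None:
--         return core, "core_id_match"
--     return target_long_id, None
-- ===== Notes on version B (the rewrite author's own statement) =====
-- stated objective: alternative
-- what changed: Replaces A's three separate filtering passes (each building a full match list) with a single pass over the keys that keeps three never-overwritten first-match slots, then returns by priority.
import Mathlib
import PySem

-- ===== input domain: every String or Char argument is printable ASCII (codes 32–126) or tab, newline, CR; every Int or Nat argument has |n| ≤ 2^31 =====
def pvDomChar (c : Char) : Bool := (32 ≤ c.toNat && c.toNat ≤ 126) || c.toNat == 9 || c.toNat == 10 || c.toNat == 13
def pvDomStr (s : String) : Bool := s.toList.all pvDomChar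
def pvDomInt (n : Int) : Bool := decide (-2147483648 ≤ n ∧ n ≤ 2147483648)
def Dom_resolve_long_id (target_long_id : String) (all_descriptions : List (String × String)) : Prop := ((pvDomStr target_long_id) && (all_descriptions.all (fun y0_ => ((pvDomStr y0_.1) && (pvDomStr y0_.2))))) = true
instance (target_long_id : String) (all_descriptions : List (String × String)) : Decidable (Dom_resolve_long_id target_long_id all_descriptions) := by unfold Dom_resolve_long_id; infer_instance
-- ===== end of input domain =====

-- ===== PORT A =====
-- B replaces A's three separate filtering passes with a single pass keeping three
-- never-overwritten first-match slots (alternative decomposition, same cost).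
-- s.split(".")[0]: split? with a non-empty separator is always `some` of a non-empty list
def pvCore (s : String) : String := ((PySem.Str.split? s ".").getD []).headD ""

def resolve_long_id (target_long_id : String) (all_descriptions : List (String × String)) : String × Option String :=
  let keys := all_descriptions.map (·.1)
  if keys.contains target_long_id then (target_long_id, some "exact")
  else
    match keys.filter (fun k => PySem.Str.startswith k target_long_id) with
    | k :: _ => (k, some "key_startswith_target")
    | [] =>
    match keys.filter (fun k => PySem.Str.startswith target_long_id k) with
    | k :: _ => (k, some "target_startswith_key")
    | [] =>
    let target_core := pvCore target_long_id
    match keys.filter (fun k => pvCore k == target_core) with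
    | k :: _ => (k, some "core_id_match")
    | [] => (target_long_id, none)

-- ===== PORT B =====
def resolve_long_id_alt (target_long_id : String) (all_descriptions : List (String × String)) : String × Option String :=
  if all_descriptions.any (fun p => p.1 == target_long_id) then (target_long_id, some "exact")
  else
    let target_core := pvCore target_long_id
    let st := all_descriptions.foldl
      (fun (acc : Option String × Option String × Option String) p =>
        let k := p.1
        ((if acc.1.isNone && PySem.Str.startswith k target_long_id then some k else acc.1),
         (if acc.2.1.isNone && PySem.Str.startswith target_long_id k then some k else acc.2.1),
         (if acc.2.2.isNone && (pvCore k == target_core) then some k else acc.2.2)))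
      (none, none, none)
    match st.1 with
    | some k => (k, some "key_startswith_target")
    | none =>
    match st.2.1 with
    | some k => (k, some "target_startswith_key")
    | none =>
    match st.2.2 with
    | some k => (k, some "core_id_match")
    | none => (target_long_id, none)

-- ===== PRECONDITION & SPEC =====
def Spec_resolve_long_id (target_long_id : String) (all_descriptions : List (String × String)) (out : String × Option String) : Prop := out = resolve_long_id_alt target_long_id all_descriptions
instance (target_long_id : String) (all_descriptions : List (String × String)) (out : String × Option String) : Decidable (Spec_resolve_long_id target_long_id all_descriptions out) := by unfold Spec_resolve_long_id; infer_instance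

-- ===== CLAIM (what is proved, stated in full; the proofs are below) =====
def Claim_equal_resolve_long_id : Prop := ∀ (target_long_id : String) (all_descriptions : List (String × String)), Dom_resolve_long_id target_long_id all_descriptions → Spec_resolve_long_id target_long_id all_descriptions (resolve_long_id target_long_id all_descriptions)

-- ===== LEMMAS AND PROOFS =====


-- a first-match slot fold equals the head of the filtered list
theorem foldl_firstSlot {A : Type} (p : A → Bool) (l : List A) (acc : Option A) :
    l.foldl (fun a x => if a.isNone && p x then some x else a) acc
      = (acc.or (l.filter p).head?) := by
  induction l generalizing acc with
  | nil => cases acc <;> rfl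
  | cons x xs ih =>
    rw [List.foldl_cons, ih, List.filter_cons]
    cases acc with
    | some v => rfl
    | none =>
      by_cases hx : p x = true
      · simp [hx]
      · simp [hx]

-- a fold over a triple of independent slots splits into three folds
theorem foldl_triple {A B C D : Type} (f : B → A → B) (g : C → A → C) (h : D → A → D)
    (l : List A) (b : B) (c : C) (d : D) :
    l.foldl (fun (acc : B × C × D) x => (f acc.1 x, g acc.2.1 x, h acc.2.2 x)) (b, c, d)
      = (l.foldl f b, l.foldl g c, l.foldl h d) := by
  induction l generalizing b c d with
  | nil => rfl
  | cons x xs ih => simp [List.foldl_cons, ih]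

theorem contains_map_fst (t : String) (l : List (String × String)) :
    (l.map (·.1)).contains t = l.any (fun p => p.1 == t) := by
  induction l with
  | nil => rfl
  | cons x xs ih =>
    simp only [List.map_cons, List.contains_cons, List.any_cons, ih]
    have hb : (t == x.1) = (x.1 == t) := by
      by_cases h : t = x.1
      · subst h; rfl
      · simp [h, Ne.symm h]
    rw [hb]

-- ===== VERDICT (by name: the statement is the Claim_ definition above) =====
theorem resolve_long_id_spec : Claim_equal_resolve_long_id := by
  intro t ds _
  unfold Spec_resolve_long_id resolve_long_id resolve_long_id_alt
  simp only [contains_map_fst]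
  by_cases hex : ds.any (fun p => p.1 == t) = true
  · simp [hex]
  · simp only [hex, if_false, Bool.false_eq_true]
    rw [foldl_triple
      (fun (a : Option String) (x : String × String) => if a.isNone && PySem.Str.startswith x.1 t then some x.1 else a)
      (fun (a : Option String) (x : String × String) => if a.isNone && PySem.Str.startswith t x.1 then some x.1 else a)
      (fun (a : Option String) (x : String × String) => if a.isNone && (pvCore x.1 == pvCore t) then some x.1 else a)]
    have e1 := foldl_firstSlot (fun k => PySem.Str.startswith k t) (ds.map (·.1)) none
    have e2 := foldl_firstSlot (fun k => PySem.Str.startswith t k) (ds.map (·.1)) none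
    have e3 := foldl_firstSlot (fun k => pvCore k == pvCore t) (ds.map (·.1)) none
    simp only [List.foldl_map, Option.none_or] at e1 e2 e3
    rw [e1, e2, e3]
    cases h1 : List.filter (fun k => PySem.Str.startswith k t) (List.map (fun x => x.1) ds) with
    | cons k _l => simp [h1]
    | nil =>
      simp only [h1, List.head?_nil]
      cases h2 : List.filter (fun k => PySem.Str.startswith t k) (List.map (fun x => x.1) ds) with
      | cons k _l => simp [h2]
      | nil =>
        simp only [h2, List.head?_nil]
        cases h3 : List.filter (fun k => pvCore k == pvCore t) (List.map (fun x => x.1) ds) with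
        | cons k _l => simp [h3]
        | nil => simp [h3]
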